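-- pv_equiv track=rewrite | github.com/prajpenmetsa/travel-bot | new/services/experience_service.py | _group_pois_by_interest
-- ===== SOURCE A (Python) =====
-- from typing import List, Dict, Any
--
-- def _group_pois_by_interest(pois: List[Dict[str, Any]], interests: List[str]) -> Dict[str, List[Dict[str, Any]]]:
--     """Group POIs by interest category"""
--     # Map POI kinds to interests
--     kind_to_interest = {
--         "historic": "history",
--         "museums": "history",
--         "archaeology": "history",
--         "architecture": "history",
--         "religion": "history",
--         "foods": "food",
--         "restaurants": "food",
--         "cafes": "food",
--         "breweries": "food",
--         "wineries": "food",
--         "sport": "adventure",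
--         "amusements": "adventure",
--         "natural": "nature",
--         "cultural": "culture",
--         "theatres_and_entertainments": "culture",
--         "beaches": "relaxation",
--         "gardens": "relaxation",
--         "spas": "relaxation",
--         "parks": "nature",
--         "commercial": "shopping",
--         "shops": "shopping",
--         "malls": "shopping",
--         "bars": "nightlife",
--         "casinos": "nightlife",
--         "zoos": "family"
--     }
--
--     grouped = {interest: [] for interest in interests}
--
--     # Add each POI to appropriate interest groups
--     for poi in pois:
--         for kind in poi.get("kinds", []):
--             if kind in kind_to_interest and kind_to_interest[kind] in interests:
--                 interest = kind_to_interest[kind]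
--                 if poi not in grouped[interest]:
--                     grouped[interest].append(poi)
--
--     return grouped
-- ===== SOURCE B (Python) =====
-- def _group_pois_by_interest(pois, interests):
--     """Group POIs by interest category"""
--     # Inverted table: interest -> kinds that belong to it (exactly the inverse of A's kind map).
--     interest_to_kinds = {
--         "history": ["historic", "museums", "archaeology", "architecture", "religion"],
--         "food": ["foods", "restaurants", "cafes", "breweries", "wineries"],
--         "adventure": ["sport", "amusements"],
--         "nature": ["natural", "parks"],
--         "culture": ["cultural", "theatres_and_entertainments"],
--         "relaxation": ["beaches", "gardens", "spas"],
--         "shopping": ["commercial", "shops", "malls"],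
--         "nightlife": ["bars", "casinos"],
--         "family": ["zoos"],
--     }
--     grouped = {}
--     for interest in interests:
--         if interest in grouped:
--             continue
--         kinds_for = interest_to_kinds.get(interest, [])
--         bucket = []
--         if kinds_for:
--             for poi in pois:
--                 if any(k in kinds_for for k in poi.get("kinds", [])) and poi not in bucket:
--                     bucket.append(poi)
--         grouped[interest] = bucket
--     return grouped
-- ===== Notes on version B (the rewrite author's own statement) =====
-- stated objective: alternative
-- what changed: B replaces A's single distributing pass (kind->interest dict dispatch into pre-built empty buckets) with the inverse data structure, an interest->kinds table, and builds each interest's bucket independently by one scan of the POI list, appending the result pairs to the output in interest order.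
import Mathlib
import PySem

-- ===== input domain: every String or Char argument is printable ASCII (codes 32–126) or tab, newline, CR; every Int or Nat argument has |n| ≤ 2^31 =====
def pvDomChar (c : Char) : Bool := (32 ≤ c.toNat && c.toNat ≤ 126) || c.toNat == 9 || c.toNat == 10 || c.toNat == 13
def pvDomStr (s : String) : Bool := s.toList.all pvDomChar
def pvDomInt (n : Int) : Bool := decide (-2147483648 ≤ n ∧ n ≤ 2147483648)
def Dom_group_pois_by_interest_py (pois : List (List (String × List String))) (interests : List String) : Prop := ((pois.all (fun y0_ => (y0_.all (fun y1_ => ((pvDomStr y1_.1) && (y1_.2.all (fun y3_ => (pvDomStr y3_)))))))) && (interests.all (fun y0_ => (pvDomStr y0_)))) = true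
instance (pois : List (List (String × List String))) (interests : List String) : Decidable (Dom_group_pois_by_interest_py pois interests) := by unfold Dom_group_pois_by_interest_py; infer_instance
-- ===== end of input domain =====

-- B inverts the data structure (an interest->kinds table) and builds each interest's bucket by its
-- own scan of the POI list, appending result pairs in interest order, instead of A's single
-- distributing pass through a kind->interest dict into pre-built empty buckets; objective: alternative.

abbrev PvPoi := List (String × List String)

-- Shared helpers (both Pythons read poi.get("kinds", []) on a Python dict, and compare pois with
-- Python's order-insensitive dict ==):
def pvKinds (poi : PvPoi) : List String :=
  (PySem.Dict.ofList poi).getD "kinds" []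

def pvPoiEq (p q : PvPoi) : Bool :=
  let dp := PySem.Dict.ofList p
  let dq := PySem.Dict.ofList q
  dp.keys.all (fun k => dq.get? k == dp.get? k) && dq.keys.all (fun k => dp.get? k == dq.get? k)

-- ===== PORT A =====
-- A's literal kind -> interest dict
def pvKindToInterest : PySem.Dict String String := PySem.Dict.ofList [
  ("historic", "history"), ("museums", "history"), ("archaeology", "history"),
  ("architecture", "history"), ("religion", "history"),
  ("foods", "food"), ("restaurants", "food"), ("cafes", "food"),
  ("breweries", "food"), ("wineries", "food"),
  ("sport", "adventure"), ("amusements", "adventure"),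
  ("natural", "nature"), ("cultural", "culture"),
  ("theatres_and_entertainments", "culture"),
  ("beaches", "relaxation"), ("gardens", "relaxation"), ("spas", "relaxation"),
  ("parks", "nature"),
  ("commercial", "shopping"), ("shops", "shopping"), ("malls", "shopping"),
  ("bars", "nightlife"), ("casinos", "nightlife"), ("zoos", "family")]

-- Literal transliteration of A: pre-build empty buckets for every interest, then one pass over
-- pois; for each kind of the poi, if it maps to a listed interest, append the poi (equality dedup).
def group_pois_by_interest_py (pois : List PvPoi) (interests : List String) : List (String × List PvPoi) :=
  let grouped : PySem.Dict String (List PvPoi) :=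
    interests.foldl (fun g interest => g.insert interest []) PySem.Dict.empty
  let final :=
    pois.foldl (fun g poi =>
      (pvKinds poi).foldl (fun g kind =>
        match pvKindToInterest.get? kind with
        | some interest =>
          if interests.contains interest then
            let cur := g.getD interest []
            if cur.any (fun q => pvPoiEq poi q) then g
            else g.insert interest (cur ++ [poi])
          else g
        | none => g) g) grouped
  final.items

-- ===== PORT B =====
-- B's literal interest -> kinds dict; its keys are distinct, so Python's
-- interest_to_kinds.get(interest, []) is exactly this chain of key tests.
def pvInvKinds (i : String) : List String :=
  if i == "history" then ["historic", "museums", "archaeology", "architecture", "religion"]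
  else if i == "food" then ["foods", "restaurants", "cafes", "breweries", "wineries"]
  else if i == "adventure" then ["sport", "amusements"]
  else if i == "nature" then ["natural", "parks"]
  else if i == "culture" then ["cultural", "theatres_and_entertainments"]
  else if i == "relaxation" then ["beaches", "gardens", "spas"]
  else if i == "shopping" then ["commercial", "shops", "malls"]
  else if i == "nightlife" then ["bars", "casinos"]
  else if i == "family" then ["zoos"]
  else []

-- B's inner loop: one scan of pois building this interest's bucket.
def pvBucketB (kindsFor : List String) (bucket : List PvPoi) : List PvPoi → List PvPoi
  | [] => bucket
  | poi :: rest =>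
      pvBucketB kindsFor
        (if (pvKinds poi).any (fun k => kindsFor.contains k) && !(bucket.any (fun q => pvPoiEq poi q))
         then bucket ++ [poi] else bucket) rest

-- B's outer loop over interests; grouped is the result dict, which only ever gains fresh keys,
-- so it is carried directly as the assoc list in insertion order. An interest with no kinds
-- ('if kinds_for:') gets its empty bucket without scanning pois.
def pvGroupB (pois : List PvPoi) (grouped : List (String × List PvPoi)) : List String → List (String × List PvPoi)
  | [] => grouped
  | interest :: rest =>
      if grouped.any (fun p => p.1 == interest) then pvGroupB pois grouped rest
      else pvGroupB pois (grouped ++ [(interest,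
        if (pvInvKinds interest).isEmpty then [] else pvBucketB (pvInvKinds interest) [] pois)]) rest

-- Transliteration of B (from Source B).
def group_pois_by_interest_py_alt (pois : List PvPoi) (interests : List String) : List (String × List PvPoi) :=
  pvGroupB pois [] interests

-- ===== PRECONDITION & SPEC =====
def Spec_group_pois_by_interest_py (pois : List (List (String × List String))) (interests : List String) (out : List (String × List (List (String × List String)))) : Prop := out = group_pois_by_interest_py_alt pois interests
instance (pois : List (List (String × List String))) (interests : List String) (out : List (String × List (List (String × List String)))) : Decidable (Spec_group_pois_by_interest_py pois interests out) := by unfold Spec_group_pois_by_interest_py; infer_instance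

-- ===== CLAIM (what is proved, stated in full; the proofs are below) =====
def Claim_equal_group_pois_by_interest_py : Prop := ∀ (pois : List (List (String × List String))) (interests : List String), Dom_group_pois_by_interest_py pois interests → Spec_group_pois_by_interest_py pois interests (group_pois_by_interest_py pois interests)

-- ===== LEMMAS AND PROOFS =====

abbrev PvDict := PySem.Dict String (List PvPoi)

-- the inverse table is exactly A's dict read backwards
set_option maxHeartbeats 2000000 in
lemma pvInv_correct (i k : String) :
    (pvInvKinds i).contains k = (pvKindToInterest.get? k == some i) := by
  have hitems : pvKindToInterest.items = [
    ("historic", "history"), ("museums", "history"), ("archaeology", "history"),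
    ("architecture", "history"), ("religion", "history"),
    ("foods", "food"), ("restaurants", "food"), ("cafes", "food"),
    ("breweries", "food"), ("wineries", "food"),
    ("sport", "adventure"), ("amusements", "adventure"),
    ("natural", "nature"), ("cultural", "culture"),
    ("theatres_and_entertainments", "culture"),
    ("beaches", "relaxation"), ("gardens", "relaxation"), ("spas", "relaxation"),
    ("parks", "nature"),
    ("commercial", "shopping"), ("shops", "shopping"), ("malls", "shopping"),
    ("bars", "nightlife"), ("casinos", "nightlife"), ("zoos", "family")] := by decide
  have hnd : pvKindToInterest.keys.Nodup := by decide
  rw [Bool.eq_iff_iff, List.contains_iff_mem, beq_iff_eq,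
    PySem.Dict.get?_eq_some_iff_mem_items _ _ _ hnd, hitems]
  unfold pvInvKinds
  split_ifs <;> simp_all [Prod.ext_iff]

-- named copy of A's kind-loop body
def pvAStepKind (interests : List String) (poi : PvPoi) (g : PvDict) (kind : String) : PvDict :=
  match pvKindToInterest.get? kind with
  | some interest =>
    if interests.contains interest then
      let cur := g.getD interest []
      if cur.any (fun q => pvPoiEq poi q) then g
      else g.insert interest (cur ++ [poi])
    else g
  | none => g

-- the common per-interest bucket step both sides reduce to
def pvBucketStep (i : String) (b : List PvPoi) (poi : PvPoi) : List PvPoi :=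
  if !(b.any (fun q => pvPoiEq poi q)) &&
     (pvKinds poi).any (fun kind => pvKindToInterest.get? kind == some i)
  then b ++ [poi] else b

def pvBucket (pois : List PvPoi) (i : String) : List PvPoi := pois.foldl (pvBucketStep i) []

lemma pvA_unfold (pois : List PvPoi) (interests : List String) :
    group_pois_by_interest_py pois interests =
      (pois.foldl (fun g poi => (pvKinds poi).foldl (pvAStepKind interests poi) g)
        (interests.foldl (fun g interest => g.insert interest []) PySem.Dict.empty)).items := rfl

lemma pvPoiEq_refl (p : PvPoi) : pvPoiEq p p = true := by
  simp [pvPoiEq, List.all_eq_true]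

-- effect of A's inner kind-loop on the bucket stored at a listed interest i
lemma pvA_inner (interests : List String) (poi : PvPoi) (i : String) (hi : i ∈ interests) :
    ∀ (kinds : List String) (g : PvDict),
      (kinds.foldl (pvAStepKind interests poi) g).getD i [] =
        if !((g.getD i []).any (fun q => pvPoiEq poi q)) &&
           kinds.any (fun kind => pvKindToInterest.get? kind == some i)
        then g.getD i [] ++ [poi] else g.getD i [] := by
  intro kinds
  induction kinds with
  | nil => intro g; simp
  | cons k rest ih =>
    intro g
    rw [List.foldl_cons, List.any_cons, ih]
    rcases h : pvKindToInterest.get? k with _ | j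
    · have hstep : pvAStepKind interests poi g k = g := by simp [pvAStepKind, h]
      rw [hstep]; simp
    · by_cases hji : j = i
      · subst hji
        by_cases hmem : (g.getD j []).any (fun q => pvPoiEq poi q) = true
        · have hstep : pvAStepKind interests poi g k = g := by
            simp [pvAStepKind, h, hmem]
          rw [hstep]; simp [hmem]
        · have hstep : pvAStepKind interests poi g k = g.insert j (g.getD j [] ++ [poi]) := by
            simp [pvAStepKind, h, hmem, hi]
          rw [hstep]
          simp [PySem.Dict.getD_insert_self, hmem, pvPoiEq_refl, List.any_append]
      · have hstep : (pvAStepKind interests poi g k).getD i [] = g.getD i [] := by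
          simp only [pvAStepKind, h]
          split
          · split
            · rfl
            · rw [PySem.Dict.getD_insert, if_neg (fun e => hji e.symm)]
          · rfl
        rw [hstep]
        simp [hji]

-- A's main loop, read at a listed interest i, is exactly the per-interest bucket fold
lemma pvA_outer (interests : List String) (i : String) (hi : i ∈ interests) :
    ∀ (pois : List PvPoi) (g : PvDict),
      (pois.foldl (fun g poi => (pvKinds poi).foldl (pvAStepKind interests poi) g) g).getD i [] =
        pois.foldl (pvBucketStep i) (g.getD i []) := by
  intro pois
  induction pois with
  | nil => intro g; rfl
  | cons poi rest ih =>
    intro g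
    rw [List.foldl_cons, List.foldl_cons, ih, pvA_inner interests poi i hi, pvBucketStep]

-- A's inner kind-loop never creates a key once every listed interest is present
lemma pvA_inner_keys (interests : List String) (poi : PvPoi) :
    ∀ (kinds : List String) (g : PvDict), (∀ j ∈ interests, g.contains j = true) →
      (kinds.foldl (pvAStepKind interests poi) g).keys = g.keys := by
  intro kinds
  induction kinds with
  | nil => intro g _; rfl
  | cons k rest ih =>
    intro g hg
    rw [List.foldl_cons]
    have hkeys : (pvAStepKind interests poi g k).keys = g.keys := by
      rcases h : pvKindToInterest.get? k with _ | j
      · simp [pvAStepKind, h]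
      · by_cases hj : interests.contains j = true
        · by_cases hmem : (g.getD j []).any (fun q => pvPoiEq poi q) = true
          · simp [pvAStepKind, h, hmem]
          · have hcj : g.contains j = true := hg j (List.contains_iff_mem.1 hj)
            simp [pvAStepKind, h, List.contains_iff_mem.1 hj, hmem,
              PySem.Dict.keys_insert_of_contains _ _ hcj]
        · have hnm : j ∉ interests := fun hm => hj (List.contains_iff_mem.2 hm)
          simp [pvAStepKind, h, hnm]
    rw [ih _ (fun j hj => by
      rw [PySem.Dict.contains_iff_mem_keys, hkeys, ← PySem.Dict.contains_iff_mem_keys]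
      exact hg j hj), hkeys]

lemma pvA_outer_keys (interests : List String) :
    ∀ (pois : List PvPoi) (g : PvDict), (∀ j ∈ interests, g.contains j = true) →
      (pois.foldl (fun g poi => (pvKinds poi).foldl (pvAStepKind interests poi) g) g).keys = g.keys := by
  intro pois
  induction pois with
  | nil => intro g _; rfl
  | cons poi rest ih =>
    intro g hg
    rw [List.foldl_cons]
    have hkeys := pvA_inner_keys interests poi (pvKinds poi) g hg
    rw [ih _ (fun j hj => by
      rw [PySem.Dict.contains_iff_mem_keys, hkeys, ← PySem.Dict.contains_iff_mem_keys]
      exact hg j hj), hkeys]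

-- A's initial dict: keys are the distinct interests, every stored bucket is empty
lemma pvInit_keys (interests : List String) :
    (interests.foldl (fun (g : PvDict) interest => g.insert interest []) PySem.Dict.empty).keys
      = PySem.Set.ofList interests := by
  rw [PySem.Dict.keys_foldl_insert (f := fun _ _ => [])]
  exact PySem.Set.update_empty interests

lemma pvInit_getD (interests : List String) :
    ∀ (g : PvDict), (∀ j, g.getD j [] = []) →
      ∀ j, (interests.foldl (fun (g : PvDict) interest => g.insert interest []) g).getD j [] = [] := by
  induction interests with
  | nil => intro g hg j; exact hg j
  | cons i rest ih =>
    intro g hg j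
    rw [List.foldl_cons]
    exact ih _ (fun j' => by rw [PySem.Dict.getD_insert]; split <;> simp [hg]) j

-- B's inner scan is the common bucket fold (via the inverse-table lemma)
lemma pvBucketB_eq_foldl (i : String) :
    ∀ (pois : List PvPoi) (b : List PvPoi),
      pvBucketB (pvInvKinds i) b pois = pois.foldl (pvBucketStep i) b := by
  intro pois
  induction pois with
  | nil => intro b; rfl
  | cons poi rest ih =>
    intro b
    rw [pvBucketB, List.foldl_cons, ih, pvBucketStep]
    have hpred : ((pvKinds poi).any fun k => (pvInvKinds i).contains k)
        = ((pvKinds poi).any fun kind => pvKindToInterest.get? kind == some i) := by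
      simp only [pvInv_correct]
    rw [hpred, Bool.and_comm]

-- an interest whose inverse kind list is empty collects nothing
lemma pvBucket_of_inv_nil (i : String) (h : pvInvKinds i = []) (pois : List PvPoi) :
    pvBucket pois i = [] := by
  have hstep : ∀ (b : List PvPoi) (poi : PvPoi), pvBucketStep i b poi = b := by
    intro b poi
    have hpred : ((pvKinds poi).any fun kind => pvKindToInterest.get? kind == some i) = false := by
      simp only [← pvInv_correct, h]
      simp
    simp [pvBucketStep, hpred]
  show pois.foldl (pvBucketStep i) [] = []
  induction pois with
  | nil => rfl
  | cons poi rest ih => rw [List.foldl_cons, hstep]; exact ih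

-- B's outer loop extends a bucket-shaped accumulator along the deduped interests
lemma pvGroupB_eq (pois : List PvPoi) :
    ∀ (interests : List String) (S : List String),
      pvGroupB pois (S.map (fun k => (k, pvBucket pois k))) interests =
        (PySem.Set.update S interests).map (fun k => (k, pvBucket pois k)) := by
  intro interests
  induction interests with
  | nil => intro S; rfl
  | cons i rest ih =>
    intro S
    rw [pvGroupB, PySem.Set.update_cons]
    have hseen : ((S.map (fun k => (k, pvBucket pois k))).any (fun p => p.1 == i)) = S.contains i := by
      simp [List.any_map, Function.comp_def, List.any_beq']
    by_cases hc : i ∈ S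
    · rw [hseen, if_pos (List.contains_iff_mem.2 hc), PySem.Set.add_of_mem hc, ih]
    · rw [hseen, if_neg (by simpa using hc), PySem.Set.add_of_not_mem hc]
      have hbkt : (if (pvInvKinds i).isEmpty then [] else pvBucketB (pvInvKinds i) [] pois)
          = pvBucket pois i := by
        by_cases hie : (pvInvKinds i).isEmpty = true
        · rw [if_pos hie, pvBucket_of_inv_nil i (List.isEmpty_iff.1 hie) pois]
        · rw [if_neg hie]; exact pvBucketB_eq_foldl i pois []
      rw [hbkt, show S.map (fun k => (k, pvBucket pois k)) ++ [(i, pvBucket pois i)]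
            = (S ++ [i]).map (fun k => (k, pvBucket pois k)) by simp, ih]

-- ===== VERDICT (by name: the statement is the Claim_ definition above) =====
theorem group_pois_by_interest_py_spec : Claim_equal_group_pois_by_interest_py := by
  intro pois interests _
  show group_pois_by_interest_py pois interests = group_pois_by_interest_py_alt pois interests
  rw [pvA_unfold]
  have hB : group_pois_by_interest_py_alt pois interests
      = (PySem.Set.ofList interests).map (fun k => (k, pvBucket pois k)) := by
    have h1 := pvGroupB_eq pois interests []
    rw [List.map_nil] at h1
    have h0 : PySem.Set.update ([] : List String) interests = PySem.Set.ofList interests :=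
      PySem.Set.update_empty interests
    rw [group_pois_by_interest_py_alt, h1, h0]
  set g0 : PvDict := interests.foldl (fun g interest => g.insert interest []) PySem.Dict.empty with hg0
  have hg0keys : g0.keys = PySem.Set.ofList interests := pvInit_keys interests
  have hg0contains : ∀ j ∈ interests, g0.contains j = true := fun j hj => by
    rw [PySem.Dict.contains_iff_mem_keys, hg0keys]; exact (PySem.Set.mem_ofList _ _).2 hj
  have hg0getD : ∀ j, g0.getD j [] = [] :=
    pvInit_getD interests PySem.Dict.empty (fun j => by simp)
  have hAkeys : (pois.foldl (fun g poi => (pvKinds poi).foldl (pvAStepKind interests poi) g) g0).keys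
      = PySem.Set.ofList interests := by
    rw [pvA_outer_keys interests pois g0 hg0contains, hg0keys]
  rw [PySem.Dict.items_eq_map_keys _ (by rw [hAkeys]; exact PySem.Set.nodup_ofList interests) [],
      hAkeys, hB]
  refine List.map_congr_left (fun k hk => ?_)
  have hki : k ∈ interests := (PySem.Set.mem_ofList _ _).1 hk
  have hA : (pois.foldl (fun g poi => (pvKinds poi).foldl (pvAStepKind interests poi) g) g0).getD k []
      = pvBucket pois k := by
    rw [pvA_outer interests k hki pois g0, hg0getD k]; rfl
  rw [hA]
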